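-- pv_equiv track=rewrite | github.com/wolfy5786/codebase_retrival | services/ingestion-worker/src/crawl/languages/java/phase2_tier1_strategy.py | _strip_java_generics
-- ===== SOURCE A (Python) =====
-- def _strip_java_generics(text: str) -> str:
--     out: list[str] = []
--     i = 0
--     while i < len(text):
--         if text[i] == "<":
--             depth = 1
--             i += 1
--             while i < len(text) and depth:
--                 if text[i] == "<":
--                     depth += 1
--                 elif text[i] == ">":
--                     depth -= 1
--                 i += 1
--             continue
--         out.append(text[i])
--         i += 1
--     return "".join(out)
-- ===== SOURCE B (Python) =====
-- def _strip_java_generics(text: str) -> str: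
--     out: list[str] = []
--     depth = 0
--     for c in text:
--         if c == "<":
--             depth += 1
--         elif c == ">" and depth > 0:
--             depth -= 1
--         elif depth == 0:
--             out.append(c)
--     return "".join(out)
-- ===== Notes on version B (the rewrite author's own statement) =====
-- stated objective: simpler
-- what changed: Replaces the nested while loops (outer index scan plus an inner loop that consumes each bracketed region) with one flat for-loop state machine that tracks an integer depth and appends a character only at depth 0.
import Mathlib
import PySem

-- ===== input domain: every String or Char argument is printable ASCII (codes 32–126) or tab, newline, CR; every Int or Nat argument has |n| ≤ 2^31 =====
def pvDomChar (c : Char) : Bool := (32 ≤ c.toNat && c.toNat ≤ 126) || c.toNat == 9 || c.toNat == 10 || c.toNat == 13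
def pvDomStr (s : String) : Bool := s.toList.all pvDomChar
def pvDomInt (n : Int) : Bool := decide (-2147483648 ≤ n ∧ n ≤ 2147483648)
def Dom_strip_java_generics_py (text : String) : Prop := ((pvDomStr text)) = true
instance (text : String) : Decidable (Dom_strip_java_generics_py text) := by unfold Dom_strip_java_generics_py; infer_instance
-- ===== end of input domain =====

-- B replaces A's nested while loops by one flat depth-counting loop (simpler decomposition, same O(n) cost).

-- ===== PORT A =====
-- inner `while i < len(text) and depth:` loop of A: consumes characters until depth hits 0
def pvSkipA : Nat → List Char → List Char
  | d, l =>
    if d = 0 then l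
    else match l with
      | [] => []
      | c :: r => pvSkipA (if c = '<' then d + 1 else if c = '>' then d - 1 else d) r
  termination_by _ l => l.length

theorem pvSkipA_length_le (d : Nat) (l : List Char) : (pvSkipA d l).length ≤ l.length := by
  induction l generalizing d with
  | nil => unfold pvSkipA; split <;> simp
  | cons c r ih =>
    unfold pvSkipA
    split
    · simp
    · exact Nat.le_trans (ih _) (Nat.le_succ _)

-- outer `while i < len(text):` loop of A
def pvGoA : List Char → List Char
  | [] => []
  | c :: r => if c = '<' then pvGoA (pvSkipA 1 r) else c :: pvGoA r
  termination_by l => l.length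
  decreasing_by
    · exact Nat.lt_succ_of_le (pvSkipA_length_le 1 r)
    · simp

def strip_java_generics_py (text : String) : String := String.mk (pvGoA text.toList)

-- ===== PORT B =====
-- one step of B's flat for-loop: state = (depth, out)
def pvStepB (st : Nat × List Char) (c : Char) : Nat × List Char :=
  if c = '<' then (st.1 + 1, st.2)
  else if c = '>' ∧ st.1 > 0 then (st.1 - 1, st.2)
  else if st.1 = 0 then (st.1, st.2 ++ [c])
  else st

def strip_java_generics_py_alt (text : String) : String :=
  String.mk (text.toList.foldl pvStepB (0, [])).2

-- ===== PRECONDITION & SPEC =====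
def Spec_strip_java_generics_py (text : String) (out : String) : Prop := out = strip_java_generics_py_alt text
instance (text : String) (out : String) : Decidable (Spec_strip_java_generics_py text out) := by unfold Spec_strip_java_generics_py; infer_instance

-- ===== CLAIM (what is proved, stated in full; the proofs are below) =====
def Claim_equal_strip_java_generics_py : Prop := ∀ (text : String), Dom_strip_java_generics_py text → Spec_strip_java_generics_py text (strip_java_generics_py text)

-- ===== LEMMAS AND PROOFS =====

-- functional description of B's loop output, recursive in the character list
def pvF : Nat → List Char → List Char
  | _, [] => []
  | d, c :: r =>
    if c = '<' then pvF (d + 1) r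
    else if c = '>' ∧ d > 0 then pvF (d - 1) r
    else if d = 0 then c :: pvF 0 r
    else pvF d r

theorem pvFoldB (l : List Char) (d : Nat) (acc : List Char) :
    (l.foldl pvStepB (d, acc)).2 = acc ++ pvF d l := by
  induction l generalizing d acc with
  | nil => simp [pvF]
  | cons c r ih =>
    simp only [List.foldl, pvF, pvStepB]
    by_cases h1 : c = '<'
    · simp [h1, ih]
    · by_cases h2 : c = '>' ∧ d > 0
      · simp [h1, h2, ih]
      · by_cases h3 : d = 0
        · simp [h1, h2, h3, ih]
        · simp [h1, h2, h3, ih]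

theorem pvF_skip (l : List Char) (d : Nat) (hd : 0 < d) :
    pvF d l = pvF 0 (pvSkipA d l) := by
  induction l generalizing d with
  | nil =>
    unfold pvSkipA
    simp [Nat.pos_iff_ne_zero.mp hd, pvF]
  | cons c r ih =>
    unfold pvSkipA
    simp only [Nat.pos_iff_ne_zero.mp hd, if_false]
    by_cases h1 : c = '<'
    · simp only [pvF, h1, if_pos rfl]
      exact ih (d + 1) (Nat.succ_pos d)
    · by_cases h2 : c = '>'
      · have : pvF d (c :: r) = pvF (d - 1) r := by
          simp [pvF, h1, h2, hd]
        rw [this, h2]; simp only [if_pos rfl, h1, if_false]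
        by_cases hd1 : d - 1 = 0
        · rw [hd1]; unfold pvSkipA; simp
        · exact ih (d - 1) (Nat.pos_iff_ne_zero.mpr hd1)
      · have : pvF d (c :: r) = pvF d r := by
          simp [pvF, h1, h2, Nat.pos_iff_ne_zero.mp hd]
        rw [this]; simp only [h1, if_false, h2, if_false]
        exact ih d hd

theorem pvGoA_eq_pvF (n : Nat) : ∀ l : List Char, l.length ≤ n → pvGoA l = pvF 0 l := by
  induction n with
  | zero =>
    intro l hl
    have : l = [] := List.length_eq_zero_iff.mp (Nat.le_zero.mp hl)
    simp [this, pvGoA, pvF]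
  | succ n ih =>
    intro l hl
    match l with
    | [] => simp [pvGoA, pvF]
    | c :: r =>
      simp only [List.length_cons, Nat.succ_le_succ_iff] at hl
      by_cases h1 : c = '<'
      · have hb : pvF 0 (c :: r) = pvF 1 r := by simp [pvF, h1]
        rw [hb, pvF_skip r 1 Nat.one_pos]
        simp only [pvGoA, h1, if_pos rfl]
        exact ih _ (Nat.le_trans (pvSkipA_length_le 1 r) hl)
      · simp only [pvGoA, h1, if_false]
        have hb : pvF 0 (c :: r) = c :: pvF 0 r := by
          simp [pvF, h1]
        rw [hb, ih r hl]

-- ===== VERDICT (by name: the statement is the Claim_ definition above) =====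
theorem strip_java_generics_py_spec : Claim_equal_strip_java_generics_py := by
  intro text _
  unfold Spec_strip_java_generics_py strip_java_generics_py strip_java_generics_py_alt
  rw [pvGoA_eq_pvF text.toList.length text.toList (Nat.le_refl _), pvFoldB]
  simp
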